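-- pv_equiv track=rewrite | github.com/ggoedde/language_models | data_reader.py | _raw_to_sequences
-- ===== SOURCE A (Python) =====
-- I_EOS = 1
--
-- def _raw_to_sequences(raw_data):
--     """Convert text file with word ids to list of sequences."""
--     sequences, sequence = [], []
--     for i in raw_data:
--         sequence.append(i)
--         if i == I_EOS:
--             sequences.append(sequence)
--             sequence = []
--
--     return sequences
-- ===== SOURCE B (Python) =====
-- I_EOS = 1
--
-- def _raw_to_sequences(raw_data):
--     """Convert text file with word ids to list of sequences."""
--     xs = list(raw_data)
--     bounds = [i for i, v in enumerate(xs) if v == I_EOS]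
--     return [xs[p + 1:b + 1] for p, b in zip([-1] + bounds, bounds)]
-- ===== Notes on version B (the rewrite author's own statement) =====
-- stated objective: alternative
-- what changed: B first collects the positions of EOS markers in one pass, then builds each sequence by slicing between consecutive boundaries, instead of A's element-by-element accumulator loop.
import Mathlib
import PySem

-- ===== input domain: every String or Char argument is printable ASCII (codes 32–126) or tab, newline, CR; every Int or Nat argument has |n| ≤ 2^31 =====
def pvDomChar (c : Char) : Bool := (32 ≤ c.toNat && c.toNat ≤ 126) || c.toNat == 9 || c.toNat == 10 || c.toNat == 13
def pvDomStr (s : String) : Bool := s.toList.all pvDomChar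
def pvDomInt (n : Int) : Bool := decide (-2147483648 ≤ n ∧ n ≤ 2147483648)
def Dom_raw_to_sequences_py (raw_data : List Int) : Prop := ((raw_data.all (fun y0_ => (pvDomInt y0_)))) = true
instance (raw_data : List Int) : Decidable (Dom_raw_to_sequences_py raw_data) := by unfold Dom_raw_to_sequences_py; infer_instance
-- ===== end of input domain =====

-- B collects EOS-marker positions in one pass and slices between consecutive boundaries, instead of A's accumulator loop (alternative decomposition, same cost).


-- ===== PORT A =====
-- loop body of A's for-loop (state: (sequences, sequence))
def pvStepA (st : List (List Int) × List Int) (i : Int) : List (List Int) × List Int :=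
  let sequence := st.2 ++ [i]
  if i == 1 then (st.1 ++ [sequence], ([] : List Int)) else (st.1, sequence)

def raw_to_sequences_py (raw_data : List Int) : List (List Int) :=
  (raw_data.foldl pvStepA ([], [])).1

-- ===== PORT B =====
def raw_to_sequences_py_alt (raw_data : List Int) : List (List Int) :=
  let xs := raw_data
  let bounds := ((PySem.List.enumerate xs 0).filter (fun p => p.2 == 1)).map (fun p => p.1)
  (((-1 : Int) :: bounds).zip bounds).map
    (fun pb => PySem.List.slice xs (some (pb.1 + 1)) (some (pb.2 + 1)))

-- ===== PRECONDITION & SPEC =====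
def Spec_raw_to_sequences_py (raw_data : List Int) (out : List (List Int)) : Prop := out = raw_to_sequences_py_alt raw_data
instance (raw_data : List Int) (out : List (List Int)) : Decidable (Spec_raw_to_sequences_py raw_data out) := by unfold Spec_raw_to_sequences_py; infer_instance

-- ===== CLAIM (what is proved, stated in full; the proofs are below) =====
def Claim_equal_raw_to_sequences_py : Prop := ∀ (raw_data : List Int), Dom_raw_to_sequences_py raw_data → Spec_raw_to_sequences_py raw_data (raw_to_sequences_py raw_data)

-- ===== LEMMAS AND PROOFS =====

/-- prepend `cur` onto the first sequence of a result list (empty stays empty) -/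
def consOnto (cur : List Int) : List (List Int) → List (List Int)
  | [] => []
  | s :: r => (cur ++ s) :: r

/-- the common recursive specification of both programs -/
def gSpec : List Int → List (List Int)
  | [] => []
  | x :: xs => if x = 1 then [x] :: gSpec xs else consOnto [x] (gSpec xs)

theorem consOnto_nil (l : List (List Int)) : consOnto [] l = l := by
  cases l <;> simp [consOnto]

theorem consOnto_consOnto (cur x : List Int) (l : List (List Int)) :
    consOnto cur (consOnto x l) = consOnto (cur ++ x) l := by
  cases l <;> simp [consOnto]

theorem foldA_eq (xs : List Int) : ∀ (acc : List (List Int)) (cur : List Int),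
    (xs.foldl pvStepA (acc, cur)).1 = acc ++ consOnto cur (gSpec xs) := by
  induction xs with
  | nil => intro acc cur; simp [gSpec, consOnto]
  | cons x xs ih =>
    intro acc cur
    rw [List.foldl_cons]
    by_cases hx : x = 1
    · subst hx
      have hs : pvStepA (acc, cur) 1 = (acc ++ [cur ++ [1]], []) := by simp [pvStepA]
      rw [hs, ih, gSpec, if_pos rfl, consOnto_nil]
      cases gSpec xs <;> simp [consOnto]
    · have hs : pvStepA (acc, cur) x = (acc, cur ++ [x]) := by simp [pvStepA, hx]
      rw [hs, ih, gSpec, if_neg hx, consOnto_consOnto]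

theorem a_eq_gSpec (xs : List Int) : raw_to_sequences_py xs = gSpec xs := by
  unfold raw_to_sequences_py
  rw [foldA_eq xs [] [], consOnto_nil, List.nil_append]

/-- the boundary list B collects, parametrised by the enumerate start -/
def bnds (xs : List Int) (s : Int) : List Int :=
  ((PySem.List.enumerate xs s).filter (fun p => p.2 == 1)).map (fun p => p.1)

/-- slices between consecutive boundaries, starting after `p` -/
def buildFrom (xs : List Int) : Int → List Int → List (List Int)
  | _, [] => []
  | p, b :: r => PySem.List.slice xs (some (p + 1)) (some (b + 1)) :: buildFrom xs b r

theorem zip_map_eq_buildFrom (xs : List Int) : ∀ (bs : List Int) (p : Int),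
    (((p :: bs).zip bs).map
      (fun pb => PySem.List.slice xs (some (pb.1 + 1)) (some (pb.2 + 1)))) = buildFrom xs p bs := by
  intro bs
  induction bs with
  | nil => intro p; simp [buildFrom]
  | cons b r ih => intro p; simp [buildFrom, ih b]

theorem altB_eq (xs : List Int) : raw_to_sequences_py_alt xs = buildFrom xs (-1) (bnds xs 0) := by
  unfold raw_to_sequences_py_alt bnds
  rw [zip_map_eq_buildFrom]

theorem enumerate_shift (xs : List Int) : ∀ (s : Int),
    PySem.List.enumerate xs (s + 1) = (PySem.List.enumerate xs s).map (fun p => (p.1 + 1, p.2)) := by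
  induction xs with
  | nil => intro s; simp [PySem.List.enumerate_nil]
  | cons x xs ih => intro s; simp [PySem.List.enumerate_cons, ih (s + 1)]

theorem bnds_shift (xs : List Int) (s : Int) :
    bnds xs (s + 1) = (bnds xs s).map (fun b => b + 1) := by
  unfold bnds
  rw [enumerate_shift]
  simp [List.filter_map, List.map_map, Function.comp_def]

theorem bnds_nonneg (xs : List Int) (s b : Int) (hs : 0 ≤ s) (h : b ∈ bnds xs s) : 0 ≤ b := by
  unfold bnds at h
  rcases List.mem_map.mp h with ⟨p, hp, rfl⟩
  have hmem := (List.mem_filter.mp hp).1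
  rcases (PySem.List.mem_enumerate_iff xs s p).mp hmem with ⟨k, hk, rfl⟩
  omega

theorem bnds_cons (x : Int) (xs : List Int) :
    bnds (x :: xs) 0 = (if x = 1 then [(0 : Int)] else []) ++ (bnds xs 0).map (fun b => b + 1) := by
  have h1 : bnds xs (0 + 1) = (bnds xs 0).map (fun b => b + 1) := bnds_shift xs 0
  unfold bnds at h1 ⊢
  norm_num at h1
  rw [PySem.List.enumerate_cons]
  by_cases hx : x = 1
  · subst hx
    simp [h1]
  · simp [hx, h1]

theorem buildFrom_shift (x : Int) (xs : List Int) : ∀ (bs : List Int) (p : Int),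
    0 ≤ p + 1 → (∀ b ∈ bs, 0 ≤ b) →
    buildFrom (x :: xs) (p + 1) (bs.map (fun b => b + 1)) = buildFrom xs p bs := by
  intro bs
  induction bs with
  | nil => intro p _ _; simp [buildFrom]
  | cons b r ih =>
    intro p hp hmem
    have hb : 0 ≤ b := hmem b (by simp)
    simp only [List.map_cons, buildFrom]
    rw [List.cons.injEq]
    refine ⟨?_, ih b (by omega) (fun c hc => hmem c (by simp [hc]))⟩
    rw [PySem.List.slice_toNat _ (by omega) (by omega),
      PySem.List.slice_toNat _ (by omega) (by omega)]
    have h1 : (p + 1 + 1).toNat = (p + 1).toNat + 1 := by omega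
    have h2 : (b + 1 + 1).toNat - (p + 1 + 1).toNat = (b + 1).toNat - (p + 1).toNat := by omega
    rw [h2, h1, List.drop_succ_cons]

theorem b_eq_gSpec (xs : List Int) : raw_to_sequences_py_alt xs = gSpec xs := by
  induction xs with
  | nil => rfl
  | cons x xs ih =>
    rw [altB_eq] at ih ⊢
    have hnn : ∀ b ∈ bnds xs 0, 0 ≤ b := fun b hb => bnds_nonneg xs 0 b le_rfl hb
    rw [bnds_cons]
    by_cases hx : x = 1
    · subst hx
      rw [if_pos rfl, List.singleton_append, gSpec, if_pos rfl]
      simp only [buildFrom]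
      have h4 := buildFrom_shift 1 xs (bnds xs 0) (-1) (by norm_num) hnn
      norm_num at h4
      rw [List.cons.injEq]
      refine ⟨?_, by rw [h4, ih]⟩
      rw [show (-1 : Int) + 1 = 0 from by norm_num,
        PySem.List.slice_toNat _ (by norm_num) (by norm_num)]
      rfl
    · rw [if_neg hx, List.nil_append, gSpec, if_neg hx, ← ih]
      cases hb : bnds xs 0 with
      | nil => simp [buildFrom, consOnto]
      | cons b r =>
        have hbnn : 0 ≤ b := hnn b (by rw [hb]; simp)
        have hrnn : ∀ c ∈ r, 0 ≤ c := fun c hc => hnn c (by rw [hb]; simp [hc])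
        simp only [List.map_cons, buildFrom]
        rw [buildFrom_shift x xs r b (by omega) hrnn, consOnto, List.cons.injEq]
        refine ⟨?_, rfl⟩
        rw [show (-1 : Int) + 1 = 0 from by norm_num,
          PySem.List.slice_toNat _ (by norm_num) (by omega),
          PySem.List.slice_toNat _ (by norm_num) (by omega)]
        have h3 : (b + 1 + 1).toNat = (b + 1).toNat + 1 := by omega
        simp [h3]

-- ===== VERDICT (by name: the statement is the Claim_ definition above) =====
theorem raw_to_sequences_py_spec : Claim_equal_raw_to_sequences_py := by
  intro raw_data _
  unfold Spec_raw_to_sequences_py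
  rw [a_eq_gSpec, b_eq_gSpec]
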